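-- pv_equiv track=rewrite | github.com/LongWeeeeeee/bets | base/test_filters.py | is_early_match_stable6k_5min
-- ===== SOURCE A (Python) =====
-- from typing import Tuple, Optional, Dict, Any
--
-- def is_early_match_stable6k_5min(match: Dict) -> Tuple[bool, Optional[str]]:
--     """Stable lead >= 6k минимум 5 минут подряд на 15-30."""
--     leads = match.get('radiantNetworthLeads', [])
--     duration = len(leads)
--
--     if duration < 30 or duration > 50:
--         return False, None
--
--     consecutive_r = 0
--     consecutive_d = 0
--
--     for i in range(15, min(30, duration)):
--         if leads[i] >= 6000:
--             consecutive_r += 1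
--             consecutive_d = 0
--             if consecutive_r >= 5:
--                 return True, 'radiant'
--         elif leads[i] <= -6000:
--             consecutive_d += 1
--             consecutive_r = 0
--             if consecutive_d >= 5:
--                 return True, 'dire'
--         else:
--             consecutive_r = 0
--             consecutive_d = 0
--
--     return False, None
-- ===== SOURCE B (Python) =====
-- from itertools import groupby
-- from typing import Tuple, Optional, Dict
--
--
-- def is_early_match_stable6k_5min(match: Dict) -> Tuple[bool, Optional[str]]:
--     """Stable lead >= 6k for at least 5 consecutive minutes in minutes 15-30."""
--     leads = match.get('radiantNetworthLeads', [])
--     if len(leads) < 30 or len(leads) > 50: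
--         return False, None
--     labels = ['r' if x >= 6000 else 'd' if x <= -6000 else None
--               for x in leads[15:30]]
--     for key, grp in groupby(labels):
--         if key is not None and len(list(grp)) >= 5:
--             return True, 'radiant' if key == 'r' else 'dire'
--     return False, None
-- ===== Notes on version B (the rewrite author's own statement) =====
-- stated objective: idiomatic
-- what changed: Replaces the stateful two-counter scan with a declarative pipeline: label each minute of the 15-30 window as 'r'/'d'/None, group consecutive equal labels with itertools.groupby, and return on the first signed run of length >= 5.
import Mathlib
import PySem

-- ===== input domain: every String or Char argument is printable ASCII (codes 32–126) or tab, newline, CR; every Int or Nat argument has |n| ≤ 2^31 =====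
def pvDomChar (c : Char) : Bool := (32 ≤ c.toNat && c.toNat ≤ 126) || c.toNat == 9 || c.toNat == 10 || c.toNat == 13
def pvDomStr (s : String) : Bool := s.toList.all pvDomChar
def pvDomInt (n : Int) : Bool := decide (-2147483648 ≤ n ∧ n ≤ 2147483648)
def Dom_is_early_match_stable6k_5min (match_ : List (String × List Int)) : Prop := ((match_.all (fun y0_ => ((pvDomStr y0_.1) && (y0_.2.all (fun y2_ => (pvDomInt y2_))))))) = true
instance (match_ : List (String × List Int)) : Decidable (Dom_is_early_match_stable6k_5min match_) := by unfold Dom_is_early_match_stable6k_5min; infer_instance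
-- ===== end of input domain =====

-- B replaces A's stateful two-counter scan with label/groupby/first-qualifying-run (same cost, more declarative).

-- ===== PORT A =====
-- A's for-loop over range(15, min(30, duration)) with the two consecutive counters.
-- The `none` branch of pyGet? is unreachable: every index 15 ≤ i < 30 is < duration (≥ 30 here).
def pvALoop (leads : List Int) : List Int → Int → Int → Bool × Option String
  | [], _, _ => (false, none)
  | i :: rest, cr, cd =>
      match PySem.List.pyGet? leads i with
      | none => (false, none)
      | some x =>
        if x ≥ 6000 then
          if cr + 1 ≥ 5 then (true, some "radiant") else pvALoop leads rest (cr + 1) 0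
        else if x ≤ -6000 then
          if cd + 1 ≥ 5 then (true, some "dire") else pvALoop leads rest 0 (cd + 1)
        else pvALoop leads rest 0 0

def is_early_match_stable6k_5min (match_ : List (String × List Int)) : Bool × Option String :=
  let leads := (PySem.Dict.mk match_).getD "radiantNetworthLeads" []
  let duration : Int := leads.length
  if duration < 30 ∨ duration > 50 then (false, none)
  else pvALoop leads (PySem.List.pyRange 15 (min 30 duration) 1) 0 0

-- ===== PORT B =====
-- 'r' if x >= 6000 else 'd' if x <= -6000 else None
def pvLabel (x : Int) : Option String :=
  if x ≥ 6000 then some "r" else if x ≤ -6000 then some "d" else none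

-- itertools.groupby: collapse consecutive equal labels into (key, run length), in order
def pvAttach (k : Option String) (c : Int) : List (Option String × Int) → List (Option String × Int)
  | [] => [(k, c)]
  | (k', n) :: rs => if k' = k then (k, c + n) :: rs else (k, c) :: (k', n) :: rs

def pvRuns : List (Option String) → List (Option String × Int)
  | [] => []
  | x :: t => pvAttach x 1 (pvRuns t)

-- the for-loop over groupby: first non-None run of length >= 5 decides
def pvFindRun : List (Option String × Int) → Bool × Option String
  | [] => (false, none)
  | (k, n) :: rs =>
      match k with
      | some s => if n ≥ 5 then (true, some (if s = "r" then "radiant" else "dire")) else pvFindRun rs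
      | none => pvFindRun rs

def is_early_match_stable6k_5min_alt (match_ : List (String × List Int)) : Bool × Option String :=
  let leads := (PySem.Dict.mk match_).getD "radiantNetworthLeads" []
  if (leads.length : Int) < 30 ∨ (leads.length : Int) > 50 then (false, none)
  else pvFindRun (pvRuns ((PySem.List.slice leads (some 15) (some 30)).map pvLabel))

-- ===== PRECONDITION & SPEC =====
def Spec_is_early_match_stable6k_5min (match_ : List (String × List Int)) (out : Bool × Option String) : Prop := out = is_early_match_stable6k_5min_alt match_
instance (match_ : List (String × List Int)) (out : Bool × Option String) : Decidable (Spec_is_early_match_stable6k_5min match_ out) := by unfold Spec_is_early_match_stable6k_5min; infer_instance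

-- ===== CLAIM (what is proved, stated in full; the proofs are below) =====
def Claim_equal_is_early_match_stable6k_5min : Prop := ∀ (match_ : List (String × List Int)), Dom_is_early_match_stable6k_5min match_ → Spec_is_early_match_stable6k_5min match_ (is_early_match_stable6k_5min match_)

-- ===== LEMMAS AND PROOFS =====
lemma pvAttach_attach_eq (k : Option String) (c c' : Int) (R : List (Option String × Int)) :
    pvAttach k c' (pvAttach k c R) = pvAttach k (c' + c) R := by
  cases R with
  | nil => simp [pvAttach]
  | cons p rs =>
      obtain ⟨k', n⟩ := p
      by_cases h : k' = k <;> simp [pvAttach, h, add_assoc]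

lemma pvAttach_attach_ne (k k' : Option String) (c c' : Int) (R : List (Option String × Int))
    (h : k' ≠ k) : pvAttach k' c' (pvAttach k c R) = (k', c') :: pvAttach k c R := by
  cases R with
  | nil => simp [pvAttach, Ne.symm h]
  | cons p rs =>
      obtain ⟨k₀, n⟩ := p
      by_cases h0 : k₀ = k <;> simp [pvAttach, h0, Ne.symm h]

lemma pvFindRun_cons_lt (s : String) (c : Int) (rs : List (Option String × Int)) (h : c < 5) :
    pvFindRun ((some s, c) :: rs) = pvFindRun rs := by
  simp [pvFindRun]; omega

lemma pvFindRun_attach_none (c : Int) (R : List (Option String × Int)) :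
    pvFindRun (pvAttach none c R) = pvFindRun R := by
  cases R with
  | nil => rfl
  | cons p rs =>
      obtain ⟨k, n⟩ := p
      by_cases h : k = (none : Option String)
      · subst h; simp [pvAttach, pvFindRun]
      · simp [pvAttach, h]
        obtain ⟨s, rfl⟩ := Option.ne_none_iff_exists'.mp h
        simp [pvFindRun]

lemma pvAttach_nonneg (k : Option String) (c : Int) (hc : 0 ≤ c)
    (R : List (Option String × Int)) (hR : ∀ p ∈ R, (0:Int) ≤ p.2) :
    ∀ p ∈ pvAttach k c R, (0:Int) ≤ p.2 := by
  cases R with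
  | nil => intro p hp; simp [pvAttach] at hp; simp [hp, hc]
  | cons q rs =>
      obtain ⟨k', n⟩ := q
      have hn : (0:Int) ≤ n := by simpa using hR (k', n) (by simp)
      by_cases h : k' = k <;> intro p hp
      · simp [pvAttach, h] at hp
        rcases hp with hp | hp
        · simp [hp]; omega
        · exact hR p (by simp [hp])
      · simp [pvAttach, h] at hp
        rcases hp with hp | hp | hp
        · simp [hp, hc]
        · simp [hp, hn]
        · exact hR p (by simp [hp])

lemma pvRuns_nonneg (l : List (Option String)) : ∀ p ∈ pvRuns l, (0:Int) ≤ p.2 := by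
  induction l with
  | nil => simp [pvRuns]
  | cons x t ih => exact pvAttach_nonneg x 1 (by norm_num) _ ih

lemma pvFindRun_attach_ge (s : String) (c : Int) (R : List (Option String × Int))
    (hc : 5 ≤ c) (hR : ∀ p ∈ R, (0:Int) ≤ p.2) :
    pvFindRun (pvAttach (some s) c R) = (true, some (if s = "r" then "radiant" else "dire")) := by
  cases R with
  | nil => simp [pvAttach, pvFindRun]; omega
  | cons p rs =>
      obtain ⟨k, n⟩ := p
      have hn : (0:Int) ≤ n := by simpa using hR (k, n) (by simp)
      by_cases h : k = some s
      · subst h; simp [pvAttach, pvFindRun]; intro h'; omega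
      · simp [pvAttach, h, pvFindRun]; intro h'; omega

-- carried state: the pending run A's counters represent, merged in front of the runs of the rest
def pvCarry (cr cd : Int) (rs : List (Option String × Int)) : List (Option String × Int) :=
  if 0 < cr then pvAttach (some "r") cr rs else if 0 < cd then pvAttach (some "d") cd rs else rs

lemma pvMain (leads : List Int) (hlen : 30 ≤ leads.length) :
    ∀ (n j : Nat) (cr cd : Int), j + n = 30 →
    0 ≤ cr → cr < 5 → 0 ≤ cd → cd < 5 → (cr = 0 ∨ cd = 0) →
    pvALoop leads (PySem.List.pyRange (j : Int) 30 1) cr cd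
      = pvFindRun (pvCarry cr cd (pvRuns ((PySem.List.slice leads (some (j : Int)) (some 30)).map pvLabel))) := by
  intro n
  induction n with
  | zero =>
      intro j cr cd hj hcr0 hcr5 hcd0 hcd5 hdisj
      have hj30 : j = 30 := by omega
      subst hj30
      rw [PySem.List.pyRange_one_eq_nil (by norm_num)]
      have hsl : PySem.List.slice leads (some ((30:Nat) : Int)) (some 30) = [] := by
        rw [PySem.List.slice_toNat leads (by positivity) (by norm_num)]
        simp only [Int.toNat_natCast, show ((30:Int)).toNat = 30 from rfl]
        simp
      rw [hsl]
      simp only [List.map_nil, pvRuns, pvALoop, pvCarry]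
      split_ifs with h1 h2
      · rw [show pvAttach (some "r") cr [] = [(some "r", cr)] from rfl, pvFindRun_cons_lt _ _ _ hcr5]; rfl
      · rw [show pvAttach (some "d") cd [] = [(some "d", cd)] from rfl, pvFindRun_cons_lt _ _ _ hcd5]; rfl
      · rfl
  | succ m ih =>
      intro j cr cd hj hcr0 hcr5 hcd0 hcd5 hdisj
      have hjlt : j < 30 := by omega
      have hjlen : j < leads.length := by omega
      rw [PySem.List.pyRange_one_cons (by exact_mod_cast hjlt)]
      have hsl : PySem.List.slice leads (some (j : Int)) (some 30) =
          leads[j] :: PySem.List.slice leads (some ((j+1 : Nat) : Int)) (some 30) := by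
        rw [PySem.List.slice_toNat leads (by positivity) (by norm_num),
            PySem.List.slice_toNat leads (by positivity) (by norm_num)]
        simp only [Int.toNat_natCast, show ((30:Int)).toNat = 30 from rfl]
        rw [List.drop_eq_getElem_cons hjlen,
            show (30:Nat) - j = ((30 - (j+1)) + 1) from by omega, List.take_succ_cons]
      rw [hsl]
      simp only [List.map_cons, pvRuns]
      have hget : PySem.List.pyGet? leads ((j : Nat) : Int) = some leads[j] := by
        rw [PySem.List.pyGet?_eq_some_getElem leads (by positivity) (by exact_mod_cast hjlen)]
        simp
      simp only [pvALoop, hget]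
      set R := pvRuns ((PySem.List.slice leads (some ((j+1 : Nat) : Int)) (some 30)).map pvLabel) with hRdef
      have hRpos : ∀ p ∈ R, (0:Int) ≤ p.2 := pvRuns_nonneg _
      have hcast : ((j:Int) + 1) = ((j+1 : Nat) : Int) := by push_cast; ring
      by_cases h6 : leads[j] ≥ 6000
      · -- label 'r'
        have hlab : pvLabel leads[j] = some "r" := by simp [pvLabel, h6]
        rw [if_pos h6, hlab]
        by_cases hfire : cr + 1 ≥ 5
        · rw [if_pos hfire]
          have hcr4 : cr = 4 := by omega
          have hcd : cd = 0 := by omega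
          subst hcr4; subst hcd
          simp only [pvCarry, if_pos (by norm_num : (0:Int) < 4)]
          rw [pvAttach_attach_eq, pvFindRun_attach_ge "r" (4 + 1) R (by norm_num) hRpos]
          simp
        · rw [if_neg hfire, hcast,
              ih (j+1) (cr+1) 0 (by omega) (by omega) (by omega) le_rfl (by norm_num) (Or.inr rfl)]
          simp only [pvCarry, if_pos (show (0:Int) < cr + 1 by omega)]
          by_cases hcrpos : (0:Int) < cr
          · have hcd : cd = 0 := hdisj.resolve_left (by omega)
            rw [if_pos hcrpos, pvAttach_attach_eq]
          · have hcr' : cr = 0 := by omega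
            subst hcr'
            rw [if_neg hcrpos]
            by_cases hcdpos : (0:Int) < cd
            · rw [if_pos hcdpos,
                  pvAttach_attach_ne _ _ _ _ _ (by simp), pvFindRun_cons_lt _ _ _ hcd5]
              simp only [zero_add, hRdef]
            · rw [if_neg hcdpos]; simp only [zero_add, hRdef]
      · rw [if_neg h6]
        by_cases hm6 : leads[j] ≤ -6000
        · -- label 'd'
          have hlab : pvLabel leads[j] = some "d" := by simp [pvLabel, h6, hm6]
          rw [if_pos hm6, hlab]
          by_cases hfire : cd + 1 ≥ 5
          · rw [if_pos hfire]
            have hcd4 : cd = 4 := by omega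
            have hcr' : cr = 0 := by omega
            subst hcd4; subst hcr'
            simp only [pvCarry, lt_irrefl, if_false, if_pos (by norm_num : (0:Int) < 4)]
            rw [pvAttach_attach_eq, pvFindRun_attach_ge "d" (4 + 1) R (by norm_num) hRpos]
            simp
          · rw [if_neg hfire, hcast,
                ih (j+1) 0 (cd+1) (by omega) le_rfl (by norm_num) (by omega) (by omega) (Or.inl rfl)]
            simp only [pvCarry, lt_irrefl, if_false, if_pos (show (0:Int) < cd + 1 by omega)]
            by_cases hcrpos : (0:Int) < cr
            · have hcd : cd = 0 := hdisj.resolve_left (by omega)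
              subst hcd
              rw [if_pos hcrpos,
                  pvAttach_attach_ne _ _ _ _ _ (by simp), pvFindRun_cons_lt _ _ _ hcr5]
              simp only [zero_add, hRdef]
            · have hcr' : cr = 0 := by omega
              subst hcr'
              rw [if_neg hcrpos]
              by_cases hcdpos : (0:Int) < cd
              · rw [if_pos hcdpos, pvAttach_attach_eq]
              · have hcd' : cd = 0 := by omega
                subst hcd'
                rw [if_neg hcdpos]; simp only [zero_add, hRdef]
        · -- label None
          have hlab : pvLabel leads[j] = none := by simp [pvLabel, h6, hm6]
          rw [if_neg hm6, hlab, hcast,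
              ih (j+1) 0 0 (by omega) le_rfl (by norm_num) le_rfl (by norm_num) (Or.inl rfl)]
          simp only [pvCarry, lt_irrefl, if_false]
          by_cases hcrpos : (0:Int) < cr
          · rw [if_pos hcrpos,
                pvAttach_attach_ne _ _ _ _ _ (by simp), pvFindRun_cons_lt _ _ _ hcr5,
                pvFindRun_attach_none]
          · rw [if_neg hcrpos]
            by_cases hcdpos : (0:Int) < cd
            · rw [if_pos hcdpos,
                  pvAttach_attach_ne _ _ _ _ _ (by simp), pvFindRun_cons_lt _ _ _ hcd5,
                  pvFindRun_attach_none]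
            · rw [if_neg hcdpos, pvFindRun_attach_none]

-- ===== VERDICT (by name: the statement is the Claim_ definition above) =====
theorem is_early_match_stable6k_5min_spec : Claim_equal_is_early_match_stable6k_5min := by
  intro m _hdom
  unfold Spec_is_early_match_stable6k_5min is_early_match_stable6k_5min is_early_match_stable6k_5min_alt
  set leads := (PySem.Dict.mk m).getD "radiantNetworthLeads" [] with hleads
  by_cases hg : ((leads.length : Int)) < 30 ∨ ((leads.length : Int)) > 50
  · simp only [if_pos hg]
  · rw [if_neg hg, if_neg hg]
    have h30 : 30 ≤ leads.length := by
      rcases not_or.mp hg with ⟨h1, _⟩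
      omega
    have hmin : min (30 : Int) ((leads.length : Int)) = 30 := by
      rcases not_or.mp hg with ⟨h1, _⟩
      omega
    have hm := pvMain leads h30 15 15 0 0 (by norm_num) le_rfl (by norm_num) le_rfl (by norm_num) (Or.inl rfl)
    simp only [pvCarry, lt_irrefl, if_false, Nat.cast_ofNat] at hm
    rw [hmin]
    exact hm
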